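-- pv_equiv track=rewrite | github.com/Moonflower2022/computational-problems | codon_to_text.py | codonWithStuffInBetweenToText
-- ===== SOURCE A (Python) =====
-- lookup1 = {
--  'AGG':'A' ,
--
--  'AGT':'B' ,
--
--  'ATA':'C' ,
--
--  'ATC':'D' ,
--
--  'ATG':'E' ,
--
--  'ATT':'F' ,
--
--  'CAA':'G' ,
--
--  'CAC':'H' ,
--
--  'CAG':'I' ,
--
--  'CAT':'J' ,
--
--  'CCA':'K' ,
--
--  'CCC':'L' ,
--
--  'CCG':'M' ,
--
--  'CCT':'N' ,
--
--  'CGA':'O' ,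
--
--  'CGC':'P' ,
--
--  'CGG':'Q' ,
--
--  'CGT':'R' ,
--
--  'CTA':'S' ,
--
--  'CTC':'T' ,
--
--  'CTG':'U' ,
--
--  'CTT':'V' ,
--
--  'GAA':'W' ,
--
--  'GAC':'X' ,
--
--  'GAG':'Y' ,
--
--  'GAT':'Z' ,
--
--  'GCA': ' ',
--
--  'GCC': ',',
--
--  'GCG':',' ,
--
--  'GCT':'-' ,
--
--  'GGA':'.' ,
--
--  'GGC':'!'
-- }
--
-- def codonWithStuffInBetweenToText(codonString, stuff):
--   product = ""
--   counter = 2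
--   codon = ""
--   errorList = ""
--   for i in range(len(codonString)):
--     if codonString[i] != stuff:
--       if i < counter:
--         codon = codon + codonString[i]
--       elif i == counter:
--         codon = codon + codonString[i]
--         if codon in lookup1:
--           product = product + lookup1[codon]
--         else:
--           product = product + "%"
--           errorList = errorList + codon + ", "
--         counter = counter + 4
--         codon = ""
--
--   return [product, errorList]
-- ===== SOURCE B (Python) =====
-- lookup1 = {
--  'AGG':'A', 'AGT':'B', 'ATA':'C', 'ATC':'D', 'ATG':'E', 'ATT':'F',
--  'CAA':'G', 'CAC':'H', 'CAG':'I', 'CAT':'J', 'CCA':'K', 'CCC':'L',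
--  'CCG':'M', 'CCT':'N', 'CGA':'O', 'CGC':'P', 'CGG':'Q', 'CGT':'R',
--  'CTA':'S', 'CTC':'T', 'CTG':'U', 'CTT':'V', 'GAA':'W', 'GAC':'X',
--  'GAG':'Y', 'GAT':'Z', 'GCA':' ', 'GCC':',', 'GCG':',', 'GCT':'-',
--  'GGA':'.', 'GGC':'!'
-- }
--
-- def codonWithStuffInBetweenToText(codonString, stuff):
--     # Walk codon boundaries directly: first window is positions [0, 2],
--     # each later window spans the next 4 positions; separator chars are
--     # filtered out of each window.  A separator sitting exactly on a
--     # boundary position stops the decoding (as in the original).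
--     product = []
--     errors = []
--     start = 0
--     counter = 2
--     n = len(codonString)
--     while counter < n:
--         if codonString[counter] == stuff:
--             break
--         codon = ''.join(ch for ch in codonString[start:counter + 1] if ch != stuff)
--         if codon in lookup1:
--             product.append(lookup1[codon])
--         else:
--             product.append('%')
--             errors.append(codon + ', ')
--         start = counter + 1
--         counter += 4
--     return [''.join(product), ''.join(errors)]
-- ===== Notes on version B (the rewrite author's own statement) =====
-- stated objective: simpler
-- what changed: Replaces A's per-character state machine (index/counter/codon accumulators updated on every character) with a while loop that jumps directly from codon boundary to codon boundary, extracting each codon as a filtered slice; outputs are accumulated in lists and joined once, avoiding A's quadratic repeated string concatenation.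
import Mathlib
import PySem

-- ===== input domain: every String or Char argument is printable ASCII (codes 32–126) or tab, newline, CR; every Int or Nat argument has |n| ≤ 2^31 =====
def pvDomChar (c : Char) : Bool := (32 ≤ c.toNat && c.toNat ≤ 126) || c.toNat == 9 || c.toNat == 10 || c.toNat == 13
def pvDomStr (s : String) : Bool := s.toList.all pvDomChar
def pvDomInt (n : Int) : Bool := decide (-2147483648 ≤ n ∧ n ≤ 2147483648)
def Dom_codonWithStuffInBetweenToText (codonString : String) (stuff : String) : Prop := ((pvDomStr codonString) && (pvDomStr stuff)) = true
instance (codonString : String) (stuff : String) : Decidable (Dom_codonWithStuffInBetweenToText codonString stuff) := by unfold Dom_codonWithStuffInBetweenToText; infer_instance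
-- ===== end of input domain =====

set_option maxRecDepth 10000


-- B replaces A's per-character state machine by a while loop over codon
-- boundary positions that extracts each codon as a filtered slice (simpler
-- decomposition; equivalence of the RETURN value is what is proved).

-- the module constant lookup1 (shared by both versions of the Python module)
def lookup1 : PySem.Dict String String := PySem.Dict.ofList
  [("AGG","A"), ("AGT","B"), ("ATA","C"), ("ATC","D"), ("ATG","E"), ("ATT","F"),
   ("CAA","G"), ("CAC","H"), ("CAG","I"), ("CAT","J"), ("CCA","K"), ("CCC","L"),
   ("CCG","M"), ("CCT","N"), ("CGA","O"), ("CGC","P"), ("CGG","Q"), ("CGT","R"),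
   ("CTA","S"), ("CTC","T"), ("CTG","U"), ("CTT","V"), ("GAA","W"), ("GAC","X"),
   ("GAG","Y"), ("GAT","Z"), ("GCA"," "), ("GCC",","), ("GCG",","), ("GCT","-"),
   ("GGA","."), ("GGC","!")]

-- ===== PORT A =====
-- A's for-loop over range(len(codonString)) with s[i], carried as a recursion
-- over the character list with the running index i; strings accumulated as
-- their character lists (String.mk at the end).
def aLoop (stuff : String) : List Char → Int → List Char → Int → List Char → List Char → List Char × List Char
  | [], _, product, _, _, errorList => (product, errorList)
  | c :: rest, i, product, counter, codon, errorList =>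
    if String.mk [c] ≠ stuff then
      if i < counter then
        aLoop stuff rest (i + 1) product counter (codon ++ [c]) errorList
      else if i = counter then
        let codon2 := codon ++ [c]
        match PySem.Dict.get? lookup1 (String.mk codon2) with
        | some v => aLoop stuff rest (i + 1) (product ++ v.toList) (counter + 4) [] errorList
        | none   => aLoop stuff rest (i + 1) (product ++ ['%']) (counter + 4) [] (errorList ++ codon2 ++ [',', ' '])
      else
        aLoop stuff rest (i + 1) product counter codon errorList
    else
      aLoop stuff rest (i + 1) product counter codon errorList

def codonWithStuffInBetweenToText (codonString : String) (stuff : String) : List String :=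
  let r := aLoop stuff codonString.toList 0 [] 2 [] []
  [String.mk r.1, String.mk r.2]

-- ===== PORT B =====
-- B's while loop: counter walks the boundary positions 2, 6, 10, …; the slice
-- codonString[start:counter+1] (both indices in range here, so = drop/take)
-- is filtered of separator characters; ''.join of appended pieces is carried
-- as list concatenation.
def bLoop (cs : List Char) (stuff : String) (start counter : Nat) (product errors : List Char) : List Char × List Char :=
  if h : counter < cs.length then
    if String.mk [cs[counter]] = stuff then
      (product, errors)
    else
      let codon := ((cs.drop start).take (counter + 1 - start)).filter (fun ch => String.mk [ch] ≠ stuff)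
      match PySem.Dict.get? lookup1 (String.mk codon) with
      | some v => bLoop cs stuff (counter + 1) (counter + 4) (product ++ v.toList) errors
      | none   => bLoop cs stuff (counter + 1) (counter + 4) (product ++ ['%']) (errors ++ codon ++ [',', ' '])
  else (product, errors)
termination_by cs.length - counter

def codonWithStuffInBetweenToText_alt (codonString : String) (stuff : String) : List String :=
  let r := bLoop codonString.toList stuff 0 2 [] []
  [String.mk r.1, String.mk r.2]

-- ===== PRECONDITION & SPEC =====
def Spec_codonWithStuffInBetweenToText (codonString : String) (stuff : String) (out : List String) : Prop := out = codonWithStuffInBetweenToText_alt codonString stuff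
instance (codonString : String) (stuff : String) (out : List String) : Decidable (Spec_codonWithStuffInBetweenToText codonString stuff out) := by unfold Spec_codonWithStuffInBetweenToText; infer_instance

-- ===== CLAIM (what is proved, stated in full; the proofs are below) =====
def Claim_equal_codonWithStuffInBetweenToText : Prop := ∀ (codonString : String) (stuff : String), Dom_codonWithStuffInBetweenToText codonString stuff → Spec_codonWithStuffInBetweenToText codonString stuff (codonWithStuffInBetweenToText codonString stuff)

-- ===== LEMMAS AND PROOFS =====

-- Once the running index has passed the boundary, A's loop changes nothing.
theorem aLoop_dead (stuff : String) (rest : List Char) :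
    ∀ (i counter : Int) (p codon e : List Char), counter < i →
    aLoop stuff rest i p counter codon e = (p, e) := by
  induction rest with
  | nil => intro i counter p codon e h; simp [aLoop]
  | cons c rest ih =>
    intro i counter p codon e h
    have h1 : ¬ i < counter := by omega
    have h2 : ¬ i = counter := by omega
    by_cases hs : String.mk [c] ≠ stuff <;>
      simp [aLoop, hs, h1, h2, ih (i + 1) counter _ _ _ (by omega)]

-- Processing a block of characters strictly before the boundary only filters
-- them into the codon accumulator.
theorem aLoop_window (stuff : String) (w : List Char) :
    ∀ (rest : List Char) (i counter : Int) (p codon e : List Char),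
    i + w.length ≤ counter →
    aLoop stuff (w ++ rest) i p counter codon e =
      aLoop stuff rest (i + w.length) p counter (codon ++ w.filter (fun ch => String.mk [ch] ≠ stuff)) e := by
  induction w with
  | nil => intro rest i counter p codon e _; simp
  | cons c w ih =>
    intro rest i counter p codon e h
    have hlt : i < counter := by simp [List.length_cons] at h; omega
    by_cases hs : String.mk [c] ≠ stuff
    · simp only [List.cons_append, aLoop, if_pos hs, if_pos hlt]
      rw [ih rest (i + 1) counter p (codon ++ [c]) e (by simp at h ⊢; omega)]
      simp [hs]
      ring_nf
    · simp only [List.cons_append, aLoop, if_neg hs]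
      rw [ih rest (i + 1) counter p codon e (by simp at h ⊢; omega)]
      have : String.mk [c] ≠ stuff ↔ False := by simpa using hs
      simp [this]
      ring_nf

-- Main correspondence: from a window start, A's remaining loop equals B's loop.
theorem main_loop (stuff : String) (cs : List Char) :
    ∀ (k start ctr : Nat), cs.length - ctr ≤ k → start ≤ ctr →
    ∀ (p e : List Char),
    aLoop stuff (cs.drop start) (start : Int) p (ctr : Int) [] e = bLoop cs stuff start ctr p e := by
  intro k
  induction k with
  | zero =>
    intro start ctr hk hle p e
    have hn : ¬ ctr < cs.length := by omega
    rw [bLoop]; simp only [dif_neg hn]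
    have := aLoop_window stuff (cs.drop start) [] (start : Int) (ctr : Int) p [] e
      (by simp [List.length_drop]; omega)
    simpa [aLoop] using this
  | succ k ih =>
    intro start ctr hk hle p e
    by_cases h : ctr < cs.length
    · -- decompose the drop at the boundary character
      have hd : ctr - start < (cs.drop start).length := by simp [List.length_drop]; omega
      have hdec : cs.drop start =
          ((cs.drop start).take (ctr - start)) ++ cs[ctr] :: cs.drop (ctr + 1) := by
        conv_lhs => rw [← List.take_append_drop (ctr - start) (cs.drop start)]
        congr 1
        rw [List.drop_drop]
        have h2 : start + (ctr - start) = ctr := by omega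
        rw [h2]
        exact (List.drop_eq_getElem_cons h).symm ▸ rfl
      rw [hdec]
      have hwlen : ((cs.drop start).take (ctr - start)).length = ctr - start := by
        simp [List.length_take, List.length_drop]; omega
      rw [aLoop_window stuff _ _ _ _ _ _ _ (by rw [hwlen]; omega)]
      rw [hwlen]
      have hidx : (start : Int) + ((ctr - start : Nat) : Int) = (ctr : Int) := by push_cast; omega
      rw [hidx]
      rw [bLoop]; simp only [dif_pos h]
      by_cases hs : String.mk [cs[ctr]] = stuff
      · -- separator on the boundary: A freezes, B breaks
        have hs' : ¬ String.mk [cs[ctr]] ≠ stuff := by simpa using hs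
        rw [if_pos hs]
        simp only [aLoop, if_neg hs']
        exact aLoop_dead stuff _ _ _ _ _ _ (by omega)
      · have hs' : String.mk [cs[ctr]] ≠ stuff := hs
        rw [if_neg hs]
        have hcodon : ((cs.drop start).take (ctr + 1 - start)).filter (fun ch => String.mk [ch] ≠ stuff)
            = ((cs.drop start).take (ctr - start)).filter (fun ch => String.mk [ch] ≠ stuff) ++ [cs[ctr]] := by
          have h3 : ctr + 1 - start = (ctr - start) + 1 := by omega
          rw [h3, List.take_succ]
          have h4 : (cs.drop start)[ctr - start]? = some cs[ctr] := by
            rw [List.getElem?_drop]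
            have h5 : start + (ctr - start) = ctr := by omega
            rw [h5, List.getElem?_eq_getElem h]
          rw [h4]
          simp [List.filter_append, hs']
        simp only [aLoop, if_pos hs', if_neg (lt_irrefl ((ctr : Int)))]
        simp only [hcodon, List.nil_append]
        have hrec : ((ctr : Int) + 1) = ((ctr + 1 : Nat) : Int) := by push_cast; ring
        have hctr4 : ((ctr : Int) + 4) = ((ctr + 4 : Nat) : Int) := by push_cast; ring
        cases hget : PySem.Dict.get? lookup1
            (String.mk (((cs.drop start).take (ctr - start)).filter (fun ch => String.mk [ch] ≠ stuff) ++ [cs[ctr]])) with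
        | some v =>
          simp only [hrec, hctr4]
          exact ih (ctr + 1) (ctr + 4) (by omega) (by omega) _ _
        | none =>
          simp only [hrec, hctr4]
          exact ih (ctr + 1) (ctr + 4) (by omega) (by omega) _ _
    · rw [bLoop]; simp only [dif_neg h]
      have := aLoop_window stuff (cs.drop start) [] (start : Int) (ctr : Int) p [] e
        (by simp [List.length_drop]; omega)
      simpa [aLoop] using this

-- ===== VERDICT (by name: the statement is the Claim_ definition above) =====
theorem codonWithStuffInBetweenToText_spec : Claim_equal_codonWithStuffInBetweenToText := by
  intro codonString stuff _
  unfold Spec_codonWithStuffInBetweenToText codonWithStuffInBetweenToText codonWithStuffInBetweenToText_alt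
  have := main_loop stuff codonString.toList (codonString.toList.length) 0 2 (by omega) (by omega) [] []
  simp only [List.drop_zero, Nat.cast_zero, Nat.cast_ofNat] at this
  rw [this]
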